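-- pv_equiv track=rewrite | github.com/jan-bogaerts/pygate | pyGate/MBus/binConverter.py | _bcd_decode
-- ===== SOURCE A (Python) =====
-- def _bcd_decode(data, size):
--     """decode a byte array into a number"""
--     val = 0
--     if data:
--         for i in range(size, 0, -1):
--             val = (val * 10) + ((data[i - 1] >> 4) & 0xF)
--             val = (val * 10) + (data[i - 1] & 0xF)
--         return val
--     return -1
-- ===== SOURCE B (Python) =====
-- def _bcd_decode(data, size):
--     """decode a byte array into a number: forward pass with an explicit
--     place-value weight (least-significant byte first), not Horner"""
--     if not data:
--         return -1
--     total = 0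
--     weight = 1
--     for i in range(size):
--         b = data[i]
--         total += (b & 0xF) * weight + ((b >> 4) & 0xF) * weight * 10
--         weight *= 100
--     return total
-- ===== Notes on version B (the rewrite author's own statement) =====
-- stated objective: alternative
-- what changed: Replaces the backward Horner fold (val = val*10 + nibble, most-significant byte first) with a single forward pass that maintains an explicit power-of-ten place-value weight and sums nibble*weight terms least-significant byte first.
-- outside the precondition, e.g. on _bcd_decode([1, 2], 3): A raises IndexError, B raises IndexError
import Mathlib
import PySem

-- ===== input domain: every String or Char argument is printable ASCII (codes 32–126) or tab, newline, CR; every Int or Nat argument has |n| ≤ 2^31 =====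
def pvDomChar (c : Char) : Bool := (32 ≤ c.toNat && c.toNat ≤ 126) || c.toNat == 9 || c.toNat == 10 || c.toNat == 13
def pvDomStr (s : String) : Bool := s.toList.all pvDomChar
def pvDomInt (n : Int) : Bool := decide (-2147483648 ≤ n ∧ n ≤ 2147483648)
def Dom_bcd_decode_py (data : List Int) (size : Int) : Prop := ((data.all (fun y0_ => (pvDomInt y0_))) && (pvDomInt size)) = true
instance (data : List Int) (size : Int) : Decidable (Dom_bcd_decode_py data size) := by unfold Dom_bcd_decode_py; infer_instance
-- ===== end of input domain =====

-- B replaces A's backward Horner fold by a forward pass that sums nibble terms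
-- against an explicit power-of-ten place-value weight (objective: alternative).

-- ===== PORT A =====
-- loop body of A: val = (val*10) + ((data[i-1] >> 4) & 0xF); val = (val*10) + (data[i-1] & 0xF)
-- (Python's '>> 4' and '& 0xF' on ints, exact on negatives, are '>>> 4' and 'PySem.Int.band · 15')
def bcdStepA (data : List Int) (val i : Int) : Int :=
  let val := val * 10 + PySem.Int.band (PySem.List.pyGetD data (i - 1) 0 >>> 4) 15
  val * 10 + PySem.Int.band (PySem.List.pyGetD data (i - 1) 0) 15

def bcd_decode_py (data : List Int) (size : Int) : Int :=
  if data ≠ [] then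
    (PySem.List.pyRange size 0 (-1)).foldl (bcdStepA data) 0
  else -1

-- ===== PORT B =====
-- loop body of B: total += (b & 0xF)*weight + ((b >> 4) & 0xF)*weight*10; weight *= 100
def bcdStepB (data : List Int) (st : Int × Int) (i : Int) : Int × Int :=
  let b := PySem.List.pyGetD data i 0
  (st.1 + PySem.Int.band b 15 * st.2 + PySem.Int.band (b >>> 4) 15 * st.2 * 10, st.2 * 100)

def bcd_decode_py_alt (data : List Int) (size : Int) : Int :=
  if data = [] then -1
  else ((PySem.List.pyRange 0 size 1).foldl (bcdStepB data) (0, 1)).1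

-- ===== PRECONDITION & SPEC =====
-- Pre_ excludes exactly the inputs where Python A raises IndexError (nonempty data with size > len(data)).
def Pre_bcd_decode_py (data : List Int) (size : Int) : Prop := data = [] ∨ size ≤ (data.length : Int)
instance (data : List Int) (size : Int) : Decidable (Pre_bcd_decode_py data size) := by unfold Pre_bcd_decode_py; infer_instance
def pvWitness_bcd_decode_py : List Int × Int := ([18, 52], 2)

def Spec_bcd_decode_py (data : List Int) (size : Int) (out : Int) : Prop := out = bcd_decode_py_alt data size
instance (data : List Int) (size : Int) (out : Int) : Decidable (Spec_bcd_decode_py data size out) := by unfold Spec_bcd_decode_py; infer_instance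

-- ===== CLAIM (what is proved, stated in full; the proofs are below) =====
def Claim_equal_bcd_decode_py : Prop := ∀ (data : List Int) (size : Int), Dom_bcd_decode_py data size → Pre_bcd_decode_py data size → Spec_bcd_decode_py data size (bcd_decode_py data size)

-- ===== LEMMAS AND PROOFS =====

-- A's fold is linear in its accumulator: starting value v contributes v * 100^n.
theorem bcdA_linear (data : List Int) : ∀ (n : Nat) (v : Int),
    (PySem.List.pyRange (n : Int) 0 (-1)).foldl (bcdStepA data) v
      = v * 100 ^ n + (PySem.List.pyRange (n : Int) 0 (-1)).foldl (bcdStepA data) 0 := by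
  intro n
  induction n with
  | zero => intro v; simp [PySem.List.pyRange_neg_one_eq_nil (by omega : (0:Int) ≤ 0)]
  | succ n ih =>
    intro v
    have hc : PySem.List.pyRange ((n + 1 : Nat) : Int) 0 (-1)
        = ((n + 1 : Nat) : Int) :: PySem.List.pyRange (((n + 1 : Nat) : Int) - 1) 0 (-1) :=
      PySem.List.pyRange_neg_one_cons (by push_cast; omega)
    have he : ((n + 1 : Nat) : Int) - 1 = (n : Int) := by push_cast; omega
    rw [hc, he, List.foldl_cons, List.foldl_cons, ih, ih (bcdStepA data 0 _)]
    simp only [bcdStepA, he]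
    ring

-- B's weight component after n steps is w * 100^n.
theorem bcdB_snd (data : List Int) : ∀ (n : Nat) (a w : Int),
    ((PySem.List.pyRange 0 (n : Int) 1).foldl (bcdStepB data) (a, w)).2 = w * 100 ^ n := by
  intro n
  induction n with
  | zero => intro a w; simp [PySem.List.pyRange_one_eq_nil (by omega : (0:Int) ≤ 0)]
  | succ n ih =>
    intro a w
    have hs : PySem.List.pyRange 0 ((n + 1 : Nat) : Int) 1
        = PySem.List.pyRange 0 (n : Int) 1 ++ [(n : Int)] := by
      have := PySem.List.pyRange_one_succ_right (a := 0) (b := (n : Int)) (by omega)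
      rw [← this]; push_cast; ring_nf
    rw [hs, List.foldl_append]
    simp only [List.foldl_cons, List.foldl_nil, bcdStepB, ih]
    ring

-- The two folds agree for every natural trip count.
theorem bcdAB (data : List Int) : ∀ (n : Nat),
    (PySem.List.pyRange (n : Int) 0 (-1)).foldl (bcdStepA data) 0
      = ((PySem.List.pyRange 0 (n : Int) 1).foldl (bcdStepB data) (0, 1)).1 := by
  intro n
  induction n with
  | zero =>
    simp [PySem.List.pyRange_neg_one_eq_nil (by omega : (0:Int) ≤ 0),
          PySem.List.pyRange_one_eq_nil (by omega : (0:Int) ≤ 0)]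
  | succ n ih =>
    have hc : PySem.List.pyRange ((n + 1 : Nat) : Int) 0 (-1)
        = ((n + 1 : Nat) : Int) :: PySem.List.pyRange (((n + 1 : Nat) : Int) - 1) 0 (-1) :=
      PySem.List.pyRange_neg_one_cons (by push_cast; omega)
    have he : ((n + 1 : Nat) : Int) - 1 = (n : Int) := by push_cast; omega
    have hs : PySem.List.pyRange 0 ((n + 1 : Nat) : Int) 1
        = PySem.List.pyRange 0 (n : Int) 1 ++ [(n : Int)] := by
      have := PySem.List.pyRange_one_succ_right (a := 0) (b := (n : Int)) (by omega)
      rw [← this]; push_cast; ring_nf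
    rw [hc, he, List.foldl_cons, bcdA_linear, ih, hs, List.foldl_append]
    simp only [List.foldl_cons, List.foldl_nil, bcdStepB, bcdStepA, he, bcdB_snd]
    ring

-- ===== VERDICT (by name: the statement is the Claim_ definition above) =====
theorem bcd_decode_py_spec : Claim_equal_bcd_decode_py := by
  intro data size _ _
  unfold Spec_bcd_decode_py bcd_decode_py bcd_decode_py_alt
  by_cases hd : data = []
  · simp [hd]
  · simp only [hd, ne_eq, not_false_eq_true, if_true, if_false]
    by_cases hs : size ≤ 0
    · simp [PySem.List.pyRange_neg_one_eq_nil hs, PySem.List.pyRange_one_eq_nil hs]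
    · have h : size = ((size.toNat : Nat) : Int) := by omega
      rw [h]; exact bcdAB data size.toNat
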